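-- pv_equiv track=rewrite | github.com/sg2499/AutoDev-Crew | src/engineering_team/dashboard.py | _preferred_preview_file
-- ===== SOURCE A (Python) =====
-- from typing import Any, Dict, List, Tuple
--
-- def _preferred_preview_file(files: List[str]) -> str | None:
--     """Choose the most useful default file to display after a run completes."""
--     preferred = [
--         "run_manifest.json",
--         "06_validation_report.md",
--         "README_GENERATED_PROJECT.md",
--         "01_product_spec.md",
--         "02_architecture.md",
--     ]
--     for item in preferred:
--         if item in files:
--             return item
--     return files[0] if files else None
-- ===== SOURCE B (Python) =====
-- def _preferred_preview_file(files):
--     """Choose the most useful default file to display after a run completes."""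
--     rank = {
--         "run_manifest.json": 0,
--         "06_validation_report.md": 1,
--         "README_GENERATED_PROJECT.md": 2,
--         "01_product_spec.md": 3,
--         "02_architecture.md": 4,
--     }
--     best = None
--     best_rank = None
--     for f in files:
--         r = rank.get(f, 5)
--         if best_rank is None or r < best_rank:
--             best, best_rank = f, r
--     return best
-- ===== Notes on version B (the rewrite author's own statement) =====
-- stated objective: alternative
-- what changed: Instead of scanning the fixed preferred list and doing a membership test over files for each entry, B builds a filename-to-priority dict and makes one pass over files, keeping the first file of strictly smallest rank (non-preferred files rank 5).
import Mathlib
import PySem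

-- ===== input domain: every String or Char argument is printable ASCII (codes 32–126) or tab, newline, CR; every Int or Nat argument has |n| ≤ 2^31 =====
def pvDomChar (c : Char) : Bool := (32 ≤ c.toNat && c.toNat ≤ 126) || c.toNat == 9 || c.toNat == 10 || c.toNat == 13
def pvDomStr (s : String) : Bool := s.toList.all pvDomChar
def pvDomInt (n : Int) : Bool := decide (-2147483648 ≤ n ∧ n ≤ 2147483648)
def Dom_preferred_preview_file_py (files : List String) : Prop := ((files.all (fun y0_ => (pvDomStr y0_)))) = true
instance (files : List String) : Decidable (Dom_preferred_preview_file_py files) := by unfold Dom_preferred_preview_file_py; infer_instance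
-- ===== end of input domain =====

-- B replaces A's scan over the fixed preferred list (with a membership test per entry)
-- by one pass over `files` tracking the first file of strictly smallest priority rank
-- (rank from a name→index dict, 5 for non-preferred); same return value (alternative).

-- B replaces A's scan over the fixed preferred list (one membership test over `files`
-- per preferred name) by a single pass over `files` with a name->priority dict,
-- keeping the first file of strictly smallest rank (rank 5 = not preferred): alternative decomposition.

-- ===== PORT A =====
def pvA_loop : List String → List String → Option String
  | [], files => files.head?
  | item :: rest, files => if item ∈ files then some item else pvA_loop rest files

def preferred_preview_file_py (files : List String) : Option String :=
  pvA_loop ["run_manifest.json", "06_validation_report.md", "README_GENERATED_PROJECT.md",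
            "01_product_spec.md", "02_architecture.md"] files

-- ===== PORT B =====
def pvRankDict : PySem.Dict String Int :=
  PySem.Dict.ofList [("run_manifest.json", 0), ("06_validation_report.md", 1),
    ("README_GENERATED_PROJECT.md", 2), ("01_product_spec.md", 3), ("02_architecture.md", 4)]

def pvB_loop : List String → Option (String × Int) → Option (String × Int)
  | [], acc => acc
  | f :: rest, acc =>
      let r := pvRankDict.getD f 5
      match acc with
      | none => pvB_loop rest (some (f, r))
      | some (b, br) => if r < br then pvB_loop rest (some (f, r)) else pvB_loop rest (some (b, br))

def preferred_preview_file_py_alt (files : List String) : Option String :=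
  (pvB_loop files none).map Prod.fst

-- ===== PRECONDITION & SPEC =====
def Spec_preferred_preview_file_py (files : List String) (out : Option String) : Prop := out = preferred_preview_file_py_alt files
instance (files : List String) (out : Option String) : Decidable (Spec_preferred_preview_file_py files out) := by unfold Spec_preferred_preview_file_py; infer_instance

-- ===== CLAIM (what is proved, stated in full; the proofs are below) =====
def Claim_equal_preferred_preview_file_py : Prop := ∀ (files : List String), Dom_preferred_preview_file_py files → Spec_preferred_preview_file_py files (preferred_preview_file_py files)

-- ===== LEMMAS AND PROOFS =====
set_option maxHeartbeats 1000000

theorem pvRankDict_mk : pvRankDict = PySem.Dict.mk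
    [("run_manifest.json", 0), ("06_validation_report.md", 1),
     ("README_GENERATED_PROJECT.md", 2), ("01_product_spec.md", 3), ("02_architecture.md", 4)] := by decide
theorem pvRank_eq (f : String) :
    pvRankDict.getD f 5 =
      if f = "run_manifest.json" then 0
      else if f = "06_validation_report.md" then 1
      else if f = "README_GENERATED_PROJECT.md" then 2
      else if f = "01_product_spec.md" then 3
      else if f = "02_architecture.md" then 4
      else 5 := by
  rw [pvRankDict_mk]
  simp only [PySem.Dict.getD, PySem.Dict.get?_mk_cons, beq_iff_eq]
  by_cases h0 : f = "run_manifest.json" <;> by_cases h1 : f = "06_validation_report.md" <;>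
    by_cases h2 : f = "README_GENERATED_PROJECT.md" <;> by_cases h3 : f = "01_product_spec.md" <;>
    by_cases h4 : f = "02_architecture.md" <;> simp_all [eq_comm, PySem.Dict.get?]

def pvChain (xs : List String) (b : String) (r : Int) : String :=
  if "run_manifest.json" ∈ xs ∧ 0 < r then "run_manifest.json"
  else if "06_validation_report.md" ∈ xs ∧ 1 < r then "06_validation_report.md"
  else if "README_GENERATED_PROJECT.md" ∈ xs ∧ 2 < r then "README_GENERATED_PROJECT.md"
  else if "01_product_spec.md" ∈ xs ∧ 3 < r then "01_product_spec.md"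
  else if "02_architecture.md" ∈ xs ∧ 4 < r then "02_architecture.md"
  else b

theorem pvB_loop_chain (xs : List String) (b : String) (r : Int) (hr : r ≤ 5) :
    (pvB_loop xs (some (b, r))).map Prod.fst = some (pvChain xs b r) := by
  induction xs generalizing b r with
  | nil => simp [pvB_loop, pvChain]
  | cons f xs ih =>
      show (if pvRankDict.getD f 5 < r then pvB_loop xs (some (f, pvRankDict.getD f 5))
            else pvB_loop xs (some (b, r))).map Prod.fst = some (pvChain (f :: xs) b r)
      rw [pvRank_eq f]
      by_cases h0 : f = "run_manifest.json"
      · subst h0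
        simp only [String.reduceEq, reduceIte]
        split_ifs with h <;> rw [ih _ _ (by omega)] <;> clear ih <;>
          simp only [pvChain, List.mem_cons] <;> split_ifs <;>
          first | omega | (simp_all <;> omega) | simp_all
      by_cases h1 : f = "06_validation_report.md"
      · subst h1
        simp only [String.reduceEq, reduceIte]
        split_ifs with h <;> rw [ih _ _ (by omega)] <;> clear ih <;>
          simp only [pvChain, List.mem_cons] <;> split_ifs <;>
          first | omega | (simp_all <;> omega) | simp_all
      by_cases h2 : f = "README_GENERATED_PROJECT.md"
      · subst h2
        simp only [String.reduceEq, reduceIte]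
        split_ifs with h <;> rw [ih _ _ (by omega)] <;> clear ih <;>
          simp only [pvChain, List.mem_cons] <;> split_ifs <;>
          first | omega | (simp_all <;> omega) | simp_all
      by_cases h3 : f = "01_product_spec.md"
      · subst h3
        simp only [String.reduceEq, reduceIte]
        split_ifs with h <;> rw [ih _ _ (by omega)] <;> clear ih <;>
          simp only [pvChain, List.mem_cons] <;> split_ifs <;>
          first | omega | (simp_all <;> omega) | simp_all
      by_cases h4 : f = "02_architecture.md"
      · subst h4
        simp only [String.reduceEq, reduceIte]
        split_ifs with h <;> rw [ih _ _ (by omega)] <;> clear ih <;>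
          simp only [pvChain, List.mem_cons] <;> split_ifs <;>
          first | omega | (simp_all <;> omega) | simp_all
      rw [if_neg (by simp [h0, h1, h2, h3, h4]; omega)]
      rw [ih b r hr]
      simp only [pvChain, List.mem_cons, Ne.symm h0, Ne.symm h1, Ne.symm h2, Ne.symm h3, Ne.symm h4, false_or]

theorem pv_main (files : List String) :
    preferred_preview_file_py files = preferred_preview_file_py_alt files := by
  cases files with
  | nil => rfl
  | cons f xs =>
      show pvA_loop _ (f :: xs) =
        (pvB_loop xs (some (f, pvRankDict.getD f 5))).map Prod.fst
      rw [pvRank_eq f]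
      by_cases h0 : f = "run_manifest.json"
      · subst h0
        simp only [String.reduceEq, reduceIte]
        rw [pvB_loop_chain _ _ _ (by omega)]
        simp only [pvA_loop, pvChain, List.mem_cons, List.head?, String.reduceEq]
        split_ifs <;> first | omega | (simp_all <;> omega) | simp_all
      by_cases h1 : f = "06_validation_report.md"
      · subst h1
        simp only [String.reduceEq, reduceIte]
        rw [pvB_loop_chain _ _ _ (by omega)]
        simp only [pvA_loop, pvChain, List.mem_cons, List.head?, String.reduceEq]
        split_ifs <;> first | omega | (simp_all <;> omega) | simp_all
      by_cases h2 : f = "README_GENERATED_PROJECT.md"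
      · subst h2
        simp only [String.reduceEq, reduceIte]
        rw [pvB_loop_chain _ _ _ (by omega)]
        simp only [pvA_loop, pvChain, List.mem_cons, List.head?, String.reduceEq]
        split_ifs <;> first | omega | (simp_all <;> omega) | simp_all
      by_cases h3 : f = "01_product_spec.md"
      · subst h3
        simp only [String.reduceEq, reduceIte]
        rw [pvB_loop_chain _ _ _ (by omega)]
        simp only [pvA_loop, pvChain, List.mem_cons, List.head?, String.reduceEq]
        split_ifs <;> first | omega | (simp_all <;> omega) | simp_all
      by_cases h4 : f = "02_architecture.md"
      · subst h4
        simp only [String.reduceEq, reduceIte]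
        rw [pvB_loop_chain _ _ _ (by omega)]
        simp only [pvA_loop, pvChain, List.mem_cons, List.head?, String.reduceEq]
        split_ifs <;> first | omega | (simp_all <;> omega) | simp_all
      · simp only [h0, h1, h2, h3, h4, ite_false]
        rw [pvB_loop_chain _ _ _ (by omega)]
        simp only [pvA_loop, pvChain, List.mem_cons, List.head?,
          Ne.symm h0, Ne.symm h1, Ne.symm h2, Ne.symm h3, Ne.symm h4, false_or]
        split_ifs <;> first | omega | (simp_all <;> omega) | simp_all

-- ===== VERDICT (by name: the statement is the Claim_ definition above) =====
theorem preferred_preview_file_py_spec : Claim_equal_preferred_preview_file_py := by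
  intro files _
  unfold Spec_preferred_preview_file_py
  exact pv_main files
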